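-- pv_equiv track=rewrite | github.com/MutopiaProject/musite | github/views.py | _get_asset_info
-- ===== SOURCE A (Python) =====
-- def _get_asset_info(infile):
--     if not infile.startswith('ftp/'):
--         return None
--     fvec = []
--     has_lys = False
--     for part in infile.split('/')[1:]:
--         if part.endswith('-lys'):
--             has_lys = True
--             break
--         if part.endswith('.ly'):
--             break
--         if part.endswith('.ily'):
--             break
--         fvec.append(part)
--     return ('/'.join(fvec), has_lys)
-- ===== SOURCE B (Python) =====
-- def _get_asset_info(infile):
--     if not infile.startswith('ftp/'):
--         return None
--     parts = infile.split('/')[1:]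
--     hit = next(((i, p) for i, p in enumerate(parts)
--                 if p.endswith(('-lys', '.ly', '.ily'))), None)
--     if hit is None:
--         return ('/'.join(parts), False)
--     i, p = hit
--     return ('/'.join(parts[:i]), p.endswith('-lys'))
-- ===== Notes on version B (the rewrite author's own statement) =====
-- stated objective: simpler
-- what changed: B locates the first terminating path part with a single next(enumerate(...)) search and then slices, instead of A's element-by-element accumulator loop with three break branches and a has_lys flag.
import Mathlib
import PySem

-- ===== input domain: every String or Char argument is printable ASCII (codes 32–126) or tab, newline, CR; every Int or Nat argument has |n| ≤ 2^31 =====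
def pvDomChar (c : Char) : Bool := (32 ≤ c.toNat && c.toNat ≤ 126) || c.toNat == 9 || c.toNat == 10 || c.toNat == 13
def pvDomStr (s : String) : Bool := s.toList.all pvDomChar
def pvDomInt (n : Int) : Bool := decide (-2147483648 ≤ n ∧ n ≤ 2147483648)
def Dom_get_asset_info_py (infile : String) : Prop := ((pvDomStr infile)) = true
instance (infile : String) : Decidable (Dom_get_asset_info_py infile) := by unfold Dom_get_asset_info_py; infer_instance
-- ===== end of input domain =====

-- B finds the first terminating path part with one search-and-slice instead of A's accumulator loop with break flags.


-- ===== PORT A =====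
-- the for-loop with its fvec accumulator, has_lys flag and three break branches
def aLoop : List String → List String → (List String × Bool)
  | [], fvec => (fvec, false)
  | p :: rest, fvec =>
    if PySem.Str.endswith p "-lys" then (fvec, true)
    else if PySem.Str.endswith p ".ly" then (fvec, false)
    else if PySem.Str.endswith p ".ily" then (fvec, false)
    else aLoop rest (fvec ++ [p])

def get_asset_info_py (infile : String) : Option (String × Bool) :=
  if !(PySem.Str.startswith infile "ftp/") then none
  else
    let r := aLoop (PySem.List.slice ((PySem.Str.split? infile "/").getD []) (some 1) none) []
    some (PySem.Str.join "/" r.1, r.2)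

-- ===== PORT B =====
-- next(((i, p) for i, p in enumerate(parts) if p.endswith(('-lys', '.ly', '.ily'))), None)
def bHit : List String → Nat → Option (Nat × String)
  | [], _ => none
  | p :: rest, i =>
    if PySem.Str.endswith p "-lys" || PySem.Str.endswith p ".ly" || PySem.Str.endswith p ".ily"
    then some (i, p) else bHit rest (i + 1)

def get_asset_info_py_alt (infile : String) : Option (String × Bool) :=
  if !(PySem.Str.startswith infile "ftp/") then none
  else
    let parts := PySem.List.slice ((PySem.Str.split? infile "/").getD []) (some 1) none
    match bHit parts 0 with
    | none => some (PySem.Str.join "/" parts, false)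
    | some (i, p) =>
        some (PySem.Str.join "/" (PySem.List.slice parts none (some (i : Int))),
              PySem.Str.endswith p "-lys")

-- ===== PRECONDITION & SPEC =====
def Spec_get_asset_info_py (infile : String) (out : Option (String × Bool)) : Prop := out = get_asset_info_py_alt infile
instance (infile : String) (out : Option (String × Bool)) : Decidable (Spec_get_asset_info_py infile out) := by unfold Spec_get_asset_info_py; infer_instance

-- ===== CLAIM (what is proved, stated in full; the proofs are below) =====
def Claim_equal_get_asset_info_py : Prop := ∀ (infile : String), Dom_get_asset_info_py infile → Spec_get_asset_info_py infile (get_asset_info_py infile)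

-- ===== LEMMAS AND PROOFS =====
theorem bHit_shift (parts : List String) (n : Nat) :
    bHit parts n = (bHit parts 0).map (fun q => (q.1 + n, q.2)) := by
  induction parts generalizing n with
  | nil => simp [bHit]
  | cons p rest ih =>
    simp only [bHit]
    split
    · simp
    · rw [ih (n + 1), ih 1]
      cases bHit rest 0 with
      | none => simp
      | some q => simp; omega

theorem aLoop_eq_bHit (parts fvec : List String) :
    aLoop parts fvec =
      match bHit parts 0 with
      | none => (fvec ++ parts, false)
      | some (i, p) => (fvec ++ parts.take i, PySem.Str.endswith p "-lys") := by
  induction parts generalizing fvec with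
  | nil => simp [aLoop, bHit]
  | cons p rest ih =>
    simp only [aLoop, bHit]
    by_cases h1 : PySem.Chars.endswith p.toList ['-', 'l', 'y', 's'] = true
    · simp [h1]
    · by_cases h2 : PySem.Chars.endswith p.toList ['.', 'l', 'y'] = true
      · simp [h1, h2]
      · by_cases h3 : PySem.Chars.endswith p.toList ['.', 'i', 'l', 'y'] = true
        · simp [h1, h2, h3]
        · have g1 : ¬ PySem.Str.endswith p "-lys" = true := by simpa using h1
          have g2 : ¬ PySem.Str.endswith p ".ly" = true := by simpa using h2
          have g3 : ¬ PySem.Str.endswith p ".ily" = true := by simpa using h3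
          have g : ¬ (PySem.Str.endswith p "-lys" || PySem.Str.endswith p ".ly"
              || PySem.Str.endswith p ".ily") = true := by simp [Bool.not_eq_true] at h1 h2 h3; simp [h1, h2, h3]
          rw [if_neg g1, if_neg g2, if_neg g3, if_neg g, ih, bHit_shift rest 1]
          cases hb : bHit rest 0 with
          | none => simp
          | some q => cases q; simp [List.take_succ_cons]

-- ===== VERDICT (by name: the statement is the Claim_ definition above) =====
theorem get_asset_info_py_spec : Claim_equal_get_asset_info_py := by
  intro infile _
  unfold Spec_get_asset_info_py get_asset_info_py get_asset_info_py_alt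
  split
  · rfl
  · simp only []
    rw [aLoop_eq_bHit]
    cases hb : bHit (PySem.List.slice ((PySem.Str.split? infile "/").getD []) (some 1) none) 0 with
    | none => simp
    | some q =>
      cases q with
      | mk i p =>
        simp [PySem.List.slice_to_natCast]
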